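-- pv_equiv track=rewrite | github.com/VlaisanFlavia/Python | Laborator 2/ex9.py | find_seats
-- ===== SOURCE A (Python) =====
-- def find_seats(matrix):
--     seats = []
--
--     num_rows = len(matrix)
--     num_cols = len(matrix[0])
--
--     for row in range(num_rows):
--         for col in range(num_cols):
--             current_height = matrix[row][col]
--
--             for r in range(row - 1, -1, -1):
--                 if matrix[r][col] >= current_height:
--                     seats.append((row, col))
--                     break
--
--     return seats
-- ===== SOURCE B (Python) =====
-- def find_seats(matrix):
--     maxes = list(matrix[0])
--     seats = []
--     for row, vals in enumerate(matrix[1:], start=1):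
--         new_maxes = []
--         for col, m in enumerate(maxes):
--             h = vals[col]
--             if m >= h:
--                 seats.append((row, col))
--             new_maxes.append(m if m > h else h)
--         maxes = new_maxes
--     return seats
-- ===== Notes on version B (the rewrite author's own statement) =====
-- stated objective: faster
-- what changed: B replaces A's backward scan of the entire column above every seat (O(rows) per seat) by a single row-major pass that keeps a running maximum per column.
import Mathlib
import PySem

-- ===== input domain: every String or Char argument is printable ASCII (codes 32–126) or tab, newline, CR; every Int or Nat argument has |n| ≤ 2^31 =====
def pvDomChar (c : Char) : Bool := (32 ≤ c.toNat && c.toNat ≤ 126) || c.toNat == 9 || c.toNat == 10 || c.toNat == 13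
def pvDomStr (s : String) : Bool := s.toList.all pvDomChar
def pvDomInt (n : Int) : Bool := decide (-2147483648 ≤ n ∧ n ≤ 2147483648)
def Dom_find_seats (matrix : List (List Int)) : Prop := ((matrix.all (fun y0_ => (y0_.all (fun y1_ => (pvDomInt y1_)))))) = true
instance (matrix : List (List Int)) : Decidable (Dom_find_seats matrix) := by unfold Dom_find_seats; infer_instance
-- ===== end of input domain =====

-- B replaces A's per-seat backward scan of the whole column by a single pass keeping a running
-- column maximum (objective: faster, asymptotic).  Equivalence of the return values is proved on
-- Pre_ (matrix nonempty, no row shorter than row 0 — elsewhere the Python raises IndexError).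

-- ===== PORT A =====
def find_seats (matrix : List (List Int)) : List (Int × Int) :=
  let num_rows : Int := matrix.length
  let num_cols : Int := (PySem.List.pyGetD matrix 0 []).length
  (PySem.List.pyRange 0 num_rows 1).foldl (fun seats row =>
    (PySem.List.pyRange 0 num_cols 1).foldl (fun seats col =>
      let current_height := PySem.List.pyGetD (PySem.List.pyGetD matrix row []) col 0
      -- the 'for r in range(row-1,-1,-1): if …: append; break' loop appends (row, col) once iff
      -- some r in the range satisfies the test — ported as .any over the same range
      if (PySem.List.pyRange (row - 1) (-1) (-1)).any
           (fun r => PySem.List.pyGetD (PySem.List.pyGetD matrix r []) col 0 ≥ current_height)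
      then seats ++ [(row, col)] else seats) seats) []

-- ===== PORT B =====
def find_seats_alt (matrix : List (List Int)) : List (Int × Int) :=
  let maxes := PySem.List.pyGetD matrix 0 []
  let st := (PySem.List.enumerate (PySem.List.slice matrix (some 1) none) 1).foldl
    (fun (st : List (Int × Int) × List Int) rv =>
      (PySem.List.enumerate st.2 0).foldl
        (fun (p : List (Int × Int) × List Int) cm =>
          let h := PySem.List.pyGetD rv.2 cm.1 0
          ((if cm.2 ≥ h then p.1 ++ [(rv.1, cm.1)] else p.1),
           p.2 ++ [if cm.2 > h then cm.2 else h]))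
        (st.1, ([] : List Int)))
    (([] : List (Int × Int)), maxes)
  st.1

-- ===== PRECONDITION & SPEC =====
-- Pre_ excludes exactly the inputs where Python A raises IndexError: the empty matrix
-- (len(matrix[0])) and matrices with a row shorter than row 0 (matrix[row][col]).
def Pre_find_seats (matrix : List (List Int)) : Prop :=
  matrix ≠ [] ∧ ∀ r ∈ matrix, (matrix.headD []).length ≤ r.length
instance (matrix : List (List Int)) : Decidable (Pre_find_seats matrix) := by
  unfold Pre_find_seats; infer_instance

def pvWitness_find_seats : List (List Int) := [[1, 2], [2, 1], [0, 3]]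

def Spec_find_seats (matrix : List (List Int)) (out : List (Int × Int)) : Prop := out = find_seats_alt matrix
instance (matrix : List (List Int)) (out : List (Int × Int)) : Decidable (Spec_find_seats matrix out) := by unfold Spec_find_seats; infer_instance

-- ===== CLAIM (what is proved, stated in full; the proofs are below) =====
def Claim_equal_find_seats : Prop := ∀ (matrix : List (List Int)), Dom_find_seats matrix → Pre_find_seats matrix → Spec_find_seats matrix (find_seats matrix)

-- ===== LEMMAS AND PROOFS =====

-- A's per-row contribution: the columns whose backward scan hits, paired with the row
def rowA (matrix : List (List Int)) (row : Int) : List (Int × Int) :=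
  ((PySem.List.pyRange 0 ((PySem.List.pyGetD matrix 0 []).length : Int) 1).filter
    (fun col => (PySem.List.pyRange (row - 1) (-1) (-1)).any
      (fun r => PySem.List.pyGetD (PySem.List.pyGetD matrix r []) col 0 ≥
                PySem.List.pyGetD (PySem.List.pyGetD matrix row []) col 0))).map
    (fun col => (row, col))

lemma A_eq_flatMap (matrix : List (List Int)) :
    find_seats matrix =
      (PySem.List.pyRange 0 (matrix.length : Int) 1).flatMap (rowA matrix) := by
  unfold find_seats
  dsimp only
  trans ((PySem.List.pyRange 0 (matrix.length : Int) 1).foldl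
    (fun seats row => seats ++ rowA matrix row) [])
  · apply PySem.List.foldl_congr_mem
    intro acc row _
    rw [PySem.List.foldl_append_if]
    rfl
  · rw [PySem.List.foldl_append_eq_flatMap]
    rfl

-- B's inner loop: appends the hit columns and rebuilds the running maxima
lemma innerB (vals : List Int) (row : Int) (maxes : List Int) (s : Int)
    (seats : List (Int × Int)) (acc : List Int) :
    (PySem.List.enumerate maxes s).foldl
      (fun (p : List (Int × Int) × List Int) cm =>
        ((if cm.2 ≥ PySem.List.pyGetD vals cm.1 0 then p.1 ++ [(row, cm.1)] else p.1),
         p.2 ++ [if cm.2 > PySem.List.pyGetD vals cm.1 0 then cm.2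
                 else PySem.List.pyGetD vals cm.1 0]))
      (seats, acc)
    = (seats ++ (PySem.List.enumerate maxes s).filterMap
          (fun cm => if cm.2 ≥ PySem.List.pyGetD vals cm.1 0 then some (row, cm.1) else none),
       acc ++ (PySem.List.enumerate maxes s).map
          (fun cm => max cm.2 (PySem.List.pyGetD vals cm.1 0))) := by
  induction maxes generalizing s seats acc with
  | nil => simp [PySem.List.enumerate_nil]
  | cons m t ih =>
    rw [PySem.List.enumerate_cons, List.foldl_cons, ih]
    have hmax : (if m > PySem.List.pyGetD vals s 0 then m else PySem.List.pyGetD vals s 0)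
        = max m (PySem.List.pyGetD vals s 0) := by split <;> omega
    by_cases hc : m ≥ PySem.List.pyGetD vals s 0 <;>
      simp [hc, hmax]

-- (filter p).map f as a filterMap, for aligning the two row computations
lemma filter_map_eq_filterMap {α β : Type} (l : List α) (p : α → Bool) (f : α → β) :
    (l.filter p).map f = l.filterMap (fun x => if p x then some (f x) else none) := by
  induction l with
  | nil => simp
  | cons x t ih => by_cases hx : p x <;> simp [hx, ih]

-- the rebuilt running-maxima list, elementwise
lemma upd_getD (maxes v : List Int) (col : Nat) (hcol : col < maxes.length) :
    (((PySem.List.enumerate maxes 0).map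
        (fun cm => max cm.2 (PySem.List.pyGetD v cm.1 0))).getD col 0)
      = max (maxes.getD col 0) (v.getD col 0) := by
  have h1 : maxes[col]? = some maxes[col] := List.getElem?_eq_getElem hcol
  simp [List.getD_eq_getElem?_getD, PySem.List.getElem?_enumerate, h1,
    PySem.List.pyGetD_natCast]

-- invariant: maxes dominates a height iff some already-processed row does, columnwise
def colOK (matrix : List (List Int)) (k : Nat) (maxes : List Int) : Prop :=
  ∀ col : Nat, col < maxes.length → ∀ h : Int,
    (h ≤ maxes.getD col 0 ↔ ∃ r : Nat, r < k ∧ h ≤ (matrix.getD r []).getD col 0)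

lemma colOK_one (matrix : List (List Int)) : colOK matrix 1 (matrix.getD 0 []) := by
  intro col hcol h
  constructor
  · intro hle; exact ⟨0, by omega, hle⟩
  · rintro ⟨r, hr, hle⟩
    have : r = 0 := by omega
    subst this; exact hle

lemma colOK_step (matrix : List (List Int)) (k : Nat) (v maxes : List Int)
    (hv : matrix.getD k [] = v) (hok : colOK matrix k maxes) :
    colOK matrix (k + 1)
      ((PySem.List.enumerate maxes 0).map (fun cm => max cm.2 (PySem.List.pyGetD v cm.1 0))) := by
  intro col hcol h
  rw [List.length_map, PySem.List.length_enumerate] at hcol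
  rw [upd_getD maxes v col hcol, le_max_iff, hok col hcol h]
  constructor
  · rintro (⟨r, hr, hle⟩ | hle)
    · exact ⟨r, by omega, hle⟩
    · exact ⟨k, by omega, by rw [hv]; exact hle⟩
  · rintro ⟨r, hr, hle⟩
    by_cases hrk : r < k
    · exact Or.inl ⟨r, hrk, hle⟩
    · have : r = k := by omega
      subst this; rw [hv] at hle; exact Or.inr hle

-- the seats B appends for one row are exactly A's per-row list
lemma FM_eq_rowA (matrix : List (List Int)) (k : Nat) (v maxes : List Int)
    (hv : matrix.getD k [] = v)
    (hlen : maxes.length = (PySem.List.pyGetD matrix 0 []).length)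
    (hok : colOK matrix k maxes) :
    (PySem.List.enumerate maxes 0).filterMap
      (fun cm => if cm.2 ≥ PySem.List.pyGetD v cm.1 0 then some ((k : Int), cm.1) else none)
      = rowA matrix (k : Int) := by
  rw [PySem.List.enumerate_eq_map_pyRange maxes 0, List.filterMap_map, rowA,
    filter_map_eq_filterMap]
  have hlen' : PySem.List.len maxes = ((PySem.List.pyGetD matrix 0 []).length : Int) := by
    simp [PySem.List.len_eq, hlen]
  rw [hlen']
  refine List.filterMap_congr ?_
  intro j hj
  rw [PySem.List.mem_pyRange_one] at hj
  obtain ⟨hj0, hjc⟩ := hj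
  set c : Nat := j.toNat with hc
  have hjc' : (j : Int) = (c : Int) := by omega
  have hcc : c < maxes.length := by omega
  have hcur : PySem.List.pyGetD (PySem.List.pyGetD matrix (k : Int) []) j 0
      = v.getD c 0 := by
    rw [hjc', PySem.List.pyGetD_natCast, PySem.List.pyGetD_natCast, hv]
  have hvj : PySem.List.pyGetD v j 0 = v.getD c 0 := by
    rw [hjc', PySem.List.pyGetD_natCast]
  have hmx : PySem.List.pyGetD maxes j 0 = maxes.getD c 0 := by
    rw [hjc', PySem.List.pyGetD_natCast]
  have hiff : (PySem.List.pyGetD maxes j 0 ≥ PySem.List.pyGetD v j 0) ↔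
      ((PySem.List.pyRange ((k : Int) - 1) (-1) (-1)).any
        (fun r => decide (PySem.List.pyGetD (PySem.List.pyGetD matrix r []) j 0 ≥
          PySem.List.pyGetD (PySem.List.pyGetD matrix (k : Int) []) j 0)) = true) := by
    rw [hmx, hvj, List.any_eq_true]
    constructor
    · intro hge
      obtain ⟨r, hr, hle⟩ := (hok c hcc (v.getD c 0)).mp hge
      refine ⟨(r : Int), ?_, ?_⟩
      · rw [PySem.List.mem_pyRange_neg_one]; omega
      · rw [hcur, hjc', PySem.List.pyGetD_natCast, PySem.List.pyGetD_natCast]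
        simpa using hle
    · rintro ⟨r, hr, hle⟩
      rw [PySem.List.mem_pyRange_neg_one] at hr
      have hr' : (r : Int) = (r.toNat : Int) := by omega
      rw [hcur, hr', PySem.List.pyGetD_natCast, hjc', PySem.List.pyGetD_natCast] at hle
      simp at hle
      exact (hok c hcc (v.getD c 0)).mpr ⟨r.toNat, by omega, hle⟩
  simp only [Function.comp_apply]
  by_cases hb : PySem.List.pyGetD maxes j 0 ≥ PySem.List.pyGetD v j 0
  · rw [if_pos hb, if_pos (hiff.mp hb)]
  · rw [if_neg hb, if_neg (fun hx => hb (hiff.mpr hx))]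

-- row 0 contributes nothing in A (the backward range is empty)
lemma rowA_zero (matrix : List (List Int)) : rowA matrix 0 = [] := by
  simp [rowA]

lemma mainB (matrix : List (List Int)) (tail : List (List Int)) :
    ∀ (k : Nat) (seats : List (Int × Int)) (maxes : List Int),
    tail = matrix.drop k → 1 ≤ k →
    maxes.length = (PySem.List.pyGetD matrix 0 []).length →
    colOK matrix k maxes →
    ((PySem.List.enumerate tail (k : Int)).foldl
      (fun (st : List (Int × Int) × List Int) rv =>
        (PySem.List.enumerate st.2 0).foldl
          (fun (p : List (Int × Int) × List Int) cm =>
            ((if cm.2 ≥ PySem.List.pyGetD rv.2 cm.1 0 then p.1 ++ [(rv.1, cm.1)] else p.1),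
             p.2 ++ [if cm.2 > PySem.List.pyGetD rv.2 cm.1 0 then cm.2
                     else PySem.List.pyGetD rv.2 cm.1 0]))
          (st.1, ([] : List Int)))
      (seats, maxes)).1
    = seats ++ (PySem.List.pyRange (k : Int) (matrix.length : Int) 1).flatMap (rowA matrix) := by
  induction tail with
  | nil =>
    intro k seats maxes htail hk hlen hok
    have hlenk : matrix.length ≤ k := by
      have := congrArg List.length htail
      simp at this; omega
    rw [PySem.List.enumerate_nil, List.foldl_nil,
      PySem.List.pyRange_one_eq_nil (by exact_mod_cast hlenk)]
    simp
  | cons v t ih =>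
    intro k seats maxes htail hk hlen hok
    have hklt : k < matrix.length := by
      have := congrArg List.length htail
      simp at this; omega
    have hv : matrix.getD k [] = v := by
      have := List.head?_drop (l := matrix) (i := k)
      rw [htail.symm] at this; simp at this
      simp [List.getD, ← this]
    have ht : t = matrix.drop (k + 1) := by
      have := List.tail_drop (l := matrix) (i := k)
      rw [htail.symm] at this; simp at this
      exact this
    rw [PySem.List.enumerate_cons, List.foldl_cons]
    dsimp only
    rw [innerB v (k : Int) maxes 0 seats []]
    have hcast : (k : Int) + 1 = ((k + 1 : Nat) : Int) := by push_cast; ring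
    rw [hcast, ih (k + 1)
      (seats ++ (PySem.List.enumerate maxes 0).filterMap
        (fun cm => if cm.2 ≥ PySem.List.pyGetD v cm.1 0 then some ((k : Int), cm.1) else none))
      ([] ++ (PySem.List.enumerate maxes 0).map
        (fun cm => max cm.2 (PySem.List.pyGetD v cm.1 0)))
      ht (by omega)
      (by simp [PySem.List.length_enumerate, hlen])
      (by simpa using colOK_step matrix k v maxes hv hok)]
    rw [FM_eq_rowA matrix k v maxes hv hlen hok]
    rw [PySem.List.pyRange_one_cons (a := (k : Int)) (by exact_mod_cast hklt)]
    rw [List.flatMap_cons, List.append_assoc, hcast]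

-- ===== VERDICT (by name: the statement is the Claim_ definition above) =====
theorem find_seats_spec : Claim_equal_find_seats := by
  intro matrix _ hpre
  obtain ⟨hne, -⟩ := hpre
  unfold Spec_find_seats
  rw [A_eq_flatMap]
  unfold find_seats_alt
  dsimp only
  rw [PySem.List.slice_from matrix (by norm_num : (0:Int) ≤ 1),
    show ((1:Int).toNat) = 1 from rfl]
  have hmain := mainB matrix (matrix.drop 1) 1 [] (PySem.List.pyGetD matrix 0 []) rfl le_rfl rfl
    (by rw [PySem.List.pyGetD_zero]; exact colOK_one matrix)
  push_cast at hmain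
  rw [hmain]
  have hlen : (0 : Int) < (matrix.length : Int) := by
    cases matrix with
    | nil => exact absurd rfl hne
    | cons a t => simp
  rw [PySem.List.pyRange_one_cons hlen, List.flatMap_cons, rowA_zero]
  simp
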